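-- pv_equiv track=rewrite | github.com/Vovanuch/python-basics-1 | adaptive_python_cource/29.Encoding_DNK/29.encoding_dnk.py | get_dict_symbols
-- ===== SOURCE A (Python) =====
-- def get_dict_symbols(my_list):
--     new_dict = dict()
--     new_list = []
--     ex_counter = 0
--     for i in my_list:
--         ex_counter += 1
--         if i not in new_list:
--             new_list.append(i)
--             new_dict[ex_counter] = i
--         elif i != new_list[len(new_list)-1]:
--             new_list.append(i)
--             new_dict[ex_counter] = i
--
--     return new_dict
-- ===== SOURCE B (Python) =====
-- def get_dict_symbols(my_list):
--     # Run-based traversal: record the 1-based start position of every maximal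
--     # run of consecutive equal elements, then jump the index past the run.
--     result = {}
--     n = len(my_list)
--     i = 0
--     while i < n:
--         v = my_list[i]
--         result[i + 1] = v
--         while i < n and my_list[i] == v:
--             i += 1
--     return result
-- ===== Notes on version B (the rewrite author's own statement) =====
-- stated objective: faster
-- what changed: B drops A's accumulated new_list (an O(k) membership scan per element plus a last-element lookup) and walks the list by maximal runs of consecutive equal elements with an index, recording each run's 1-based start position and jumping past the run, one O(1) step per element.
import Mathlib
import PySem

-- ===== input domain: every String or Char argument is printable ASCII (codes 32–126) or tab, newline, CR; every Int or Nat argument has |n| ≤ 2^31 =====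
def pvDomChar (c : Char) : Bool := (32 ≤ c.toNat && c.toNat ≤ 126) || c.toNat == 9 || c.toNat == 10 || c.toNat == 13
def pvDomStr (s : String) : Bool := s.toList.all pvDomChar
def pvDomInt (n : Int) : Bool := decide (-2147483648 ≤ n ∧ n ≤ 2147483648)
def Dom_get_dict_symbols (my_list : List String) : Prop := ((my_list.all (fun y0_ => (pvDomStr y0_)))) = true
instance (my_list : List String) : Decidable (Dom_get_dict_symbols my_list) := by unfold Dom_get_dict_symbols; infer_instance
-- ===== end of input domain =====

-- B replaces A's per-element membership scan of the accumulated new_list by a run-skipping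
-- index walk over maximal runs of consecutive equal elements (objective: faster, measured).

-- ===== PORT A =====
-- Literal transliteration of A: fold over my_list with state (new_dict, new_list, ex_counter).
-- The elif's new_list[len(new_list)-1] is ported via pyGet?; that branch is only reached when
-- i ∈ new_list, so the index is in range and the Option comparison is exact.
def get_dict_symbols (my_list : List String) : List (Int × String) :=
  (my_list.foldl
    (fun (st : PySem.Dict Int String × List String × Int) i =>
      let new_dict := st.1
      let new_list := st.2.1
      let ex_counter := st.2.2 + 1
      if i ∉ new_list then
        (new_dict.insert ex_counter i, new_list ++ [i], ex_counter)
      else if some i ≠ PySem.List.pyGet? new_list ((new_list.length : Int) - 1) then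
        (new_dict.insert ex_counter i, new_list ++ [i], ex_counter)
      else
        (new_dict, new_list, ex_counter))
    (PySem.Dict.empty, [], 0)).1.items

-- ===== PORT B =====
-- inner while: advance i past the run of elements equal to v
def altSkip (xs : List String) (v : String) (i : Nat) : Nat :=
  if h : i < xs.length then
    if xs[i] = v then altSkip xs v (i + 1) else i
  else i
termination_by xs.length - i
decreasing_by exact Nat.sub_succ_lt_self _ _ h

-- needed for altGo's termination
theorem altSkip_ge (xs : List String) (v : String) (i : Nat) : i ≤ altSkip xs v i := by
  unfold altSkip
  split
  · split
    · have := altSkip_ge xs v (i + 1); omega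
    · exact le_refl i
  · exact le_refl i
termination_by xs.length - i

-- outer while over run starts
def altGo (xs : List String) (i : Nat) (d : PySem.Dict Int String) : PySem.Dict Int String :=
  if h : i < xs.length then
    altGo xs (altSkip xs (xs[i]) i) (d.insert ((i : Int) + 1) (xs[i]))
  else d
termination_by xs.length - i
decreasing_by
  have h1 : i + 1 ≤ altSkip xs (xs[i]) i := by
    rw [altSkip, dif_pos h, if_pos rfl]
    exact altSkip_ge xs (xs[i]) (i + 1)
  exact Nat.lt_of_le_of_lt (Nat.sub_le_sub_left h1 xs.length) (Nat.sub_succ_lt_self xs.length i h)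

def get_dict_symbols_alt (my_list : List String) : List (Int × String) :=
  (altGo my_list 0 PySem.Dict.empty).items

-- ===== PRECONDITION & SPEC =====
def Spec_get_dict_symbols (my_list : List String) (out : List (Int × String)) : Prop := out = get_dict_symbols_alt my_list
instance (my_list : List String) (out : List (Int × String)) : Decidable (Spec_get_dict_symbols my_list out) := by unfold Spec_get_dict_symbols; infer_instance

-- ===== CLAIM (what is proved, stated in full; the proofs are below) =====
def Claim_equal_get_dict_symbols : Prop := ∀ (my_list : List String), Dom_get_dict_symbols my_list → Spec_get_dict_symbols my_list (get_dict_symbols my_list)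

-- ===== LEMMAS AND PROOFS =====

theorem altSkip_stop (xs : List String) (v : String) (i : Nat) :
    ∀ w, xs[altSkip xs v i]? = some w → w ≠ v := by
  rw [altSkip]
  split_ifs with h heq
  · exact altSkip_stop xs v (i + 1)
  · intro w hw hv
    rw [List.getElem?_eq_getElem h] at hw
    injection hw with hw'
    exact heq (hw'.trans hv)
  · intro w hw
    rw [List.getElem?_eq_none (by omega)] at hw
    cases hw
termination_by xs.length - i

-- middle form: A's loop rephrased as "compare with the previously kept value"
def go' : List String → Option String → Int → PySem.Dict Int String → PySem.Dict Int String
  | [], _, _, d => d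
  | x :: rest, prev, idx, d =>
      if some x = prev then go' rest prev (idx + 1) d
      else go' rest (some x) (idx + 1) (d.insert idx x)

-- A's fold step equals the "last kept" step
theorem stepAB (st : PySem.Dict Int String × List String × Int) (i : String) :
    (let new_dict := st.1
     let new_list := st.2.1
     let ex_counter := st.2.2 + 1
     if i ∉ new_list then
       (new_dict.insert ex_counter i, new_list ++ [i], ex_counter)
     else if some i ≠ PySem.List.pyGet? new_list ((new_list.length : Int) - 1) then
       (new_dict.insert ex_counter i, new_list ++ [i], ex_counter)
     else
       (new_dict, new_list, ex_counter))
    =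
    (if some i ≠ st.2.1.getLast? then
       (st.1.insert (st.2.2 + 1) i, st.2.1 ++ [i], st.2.2 + 1)
     else (st.1, st.2.1, st.2.2 + 1)) := by
  obtain ⟨d, nl, c⟩ := st
  by_cases hmem : i ∈ nl
  · have hne : nl ≠ [] := List.ne_nil_of_mem hmem
    have hget : PySem.List.pyGet? nl ((nl.length : Int) - 1) = nl.getLast? := by
      have hlen : 1 ≤ nl.length := List.length_pos_iff.mpr hne
      have hcast : ((nl.length : Int) - 1) = ((nl.length - 1 : Nat) : Int) := by omega
      rw [hcast, PySem.List.pyGet?_natCast, List.getLast?_eq_getElem?]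
    simp [hmem, hget]
  · have hlast : some i ≠ nl.getLast? := by
      intro h
      exact hmem (List.mem_of_getLast? h.symm)
    simp [hmem, hlast]

theorem foldB (xs : List String) : ∀ (nl : List String) (c : Int) (d : PySem.Dict Int String),
    (xs.foldl
      (fun (st : PySem.Dict Int String × List String × Int) i =>
        if some i ≠ st.2.1.getLast? then
          (st.1.insert (st.2.2 + 1) i, st.2.1 ++ [i], st.2.2 + 1)
        else (st.1, st.2.1, st.2.2 + 1))
      (d, nl, c)).1 = go' xs nl.getLast? (c + 1) d := by
  induction xs with
  | nil => intro nl c d; simp [go']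
  | cons x rest ih =>
      intro nl c d
      by_cases hx : some x = nl.getLast?
      · rw [List.foldl_cons, if_neg (not_not_intro hx)]
        simp only [go']
        rw [if_pos hx]
        exact ih nl (c + 1) d
      · rw [List.foldl_cons, if_pos hx]
        simp only [go']
        rw [if_neg hx, ih (nl ++ [x]) (c + 1) (d.insert (c + 1) x)]
        simp

theorem go'_skip (xs : List String) (v : String) (i : Nat) (d : PySem.Dict Int String) :
    go' (xs.drop i) (some v) ((i : Int) + 1) d
      = go' (xs.drop (altSkip xs v i)) (some v) ((altSkip xs v i : Int) + 1) d := by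
  rw [altSkip]
  split_ifs with h heq
  · rw [List.drop_eq_getElem_cons h]
    simp only [go']
    rw [if_pos (by rw [heq]),
      show ((i : Int) + 1 + 1) = ((i + 1 : Nat) : Int) + 1 by push_cast; ring]
    exact go'_skip xs v (i + 1) d
  · rfl
  · rfl
termination_by xs.length - i

theorem go'_altGo (xs : List String) (i : Nat) (d : PySem.Dict Int String)
    (prev : Option String) (hprev : ∀ (h : i < xs.length), prev ≠ some (xs[i]'h)) :
    go' (xs.drop i) prev ((i : Int) + 1) d = altGo xs i d := by
  rw [altGo]
  split
  · rename_i h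
    rw [List.drop_eq_getElem_cons h]
    simp only [go']
    rw [if_neg (show ¬ (some (xs[i]'h) = prev) from fun hc => hprev h hc.symm)]
    have hskip1 : altSkip xs (xs[i]) (i + 1) = altSkip xs (xs[i]) i := by
      conv_rhs => rw [altSkip, dif_pos h, if_pos rfl]
    calc go' (xs.drop (i + 1)) (some (xs[i]'h)) ((i : Int) + 1 + 1) (d.insert ((i : Int) + 1) (xs[i]'h))
        = go' (xs.drop (i + 1)) (some (xs[i]'h)) (((i + 1 : Nat) : Int) + 1) (d.insert ((i : Int) + 1) (xs[i]'h)) := by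
          norm_num
      _ = go' (xs.drop (altSkip xs (xs[i]) i)) (some (xs[i]'h)) ((altSkip xs (xs[i]) i : Int) + 1) (d.insert ((i : Int) + 1) (xs[i]'h)) := by
          rw [go'_skip xs (xs[i]) (i + 1) (d.insert ((i : Int) + 1) (xs[i]'h)), hskip1]
      _ = altGo xs (altSkip xs (xs[i]) i) (d.insert ((i : Int) + 1) (xs[i]'h)) := by
          apply go'_altGo
          intro hlt hc
          exact altSkip_stop xs (xs[i]) i (xs[altSkip xs (xs[i]) i]'hlt)
            (List.getElem?_eq_getElem hlt) (by injection hc with hc'; exact hc'.symm)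
  · rename_i h
    rw [List.drop_eq_nil_of_le (by omega)]
    rfl
termination_by xs.length - i
decreasing_by have := altSkip_ge xs (xs[i]) (i + 1); omega

-- ===== VERDICT (by name: the statement is the Claim_ definition above) =====
theorem get_dict_symbols_spec : Claim_equal_get_dict_symbols := by
  intro my_list _
  unfold Spec_get_dict_symbols get_dict_symbols get_dict_symbols_alt
  have hfun : (fun (st : PySem.Dict Int String × List String × Int) i =>
      let new_dict := st.1
      let new_list := st.2.1
      let ex_counter := st.2.2 + 1
      if i ∉ new_list then
        (new_dict.insert ex_counter i, new_list ++ [i], ex_counter)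
      else if some i ≠ PySem.List.pyGet? new_list ((new_list.length : Int) - 1) then
        (new_dict.insert ex_counter i, new_list ++ [i], ex_counter)
      else
        (new_dict, new_list, ex_counter))
    = (fun (st : PySem.Dict Int String × List String × Int) i =>
      if some i ≠ st.2.1.getLast? then
        (st.1.insert (st.2.2 + 1) i, st.2.1 ++ [i], st.2.2 + 1)
      else (st.1, st.2.1, st.2.2 + 1)) :=
    funext fun st => funext fun i => stepAB st i
  rw [hfun, foldB my_list [] 0 PySem.Dict.empty]
  have h := go'_altGo my_list 0 PySem.Dict.empty none (fun _ hc => by cases hc)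
  simp only [List.drop_zero, Nat.cast_zero] at h
  simp only [List.getLast?_nil]
  rw [show (0 : Int) + 1 = 0 + 1 from rfl, ← h]
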